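-- pv_equiv track=rewrite | github.com/jiyojeong/secugate | scripts/tfplan_iac_graph.py | _all_simple_paths
-- ===== SOURCE A (Python) =====
-- def _all_simple_paths(
--     graph: dict[str, set[str]],
--     start: str,
--     goal: str,
--     max_depth: int,
-- ) -> list[list[str]]:
--     # DFS로 단순 경로(노드 중복 없음)를 전부 탐색
--     paths: list[list[str]] = []
--
--     def dfs(current: str, visited: set[str], path: list[str]) -> None:
--         if len(path) - 1 > max_depth:
--             return
--         if current == goal and len(path) > 1:
--             paths.append(path[:])
--             return
--
--         for nxt in sorted(graph.get(current, set())):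
--             if nxt in visited:
--                 continue
--             visited.add(nxt)
--             path.append(nxt)
--             dfs(nxt, visited, path)
--             path.pop()
--             visited.remove(nxt)
--
--     dfs(start, {start}, [start])
--     return paths
-- ===== SOURCE B (Python) =====
-- def _all_simple_paths(graph, start, goal, max_depth):
--     # Iterative DFS with an explicit stack of frames (no recursion): each frame
--     # holds the still-unprocessed sorted neighbors of the node currently on the
--     # path; goal hits are recorded when a node is entered, and the goal is a sink.
--     paths = []
--     path = [start]
--     visited = {start}
--     stack = []
--
--     def enter(node):
--         # Upon entering `node` (already appended to path/visited): either the
--         # path is finished/cut (return None) or a new frame of neighbors opens.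
--         if len(path) - 1 > max_depth:
--             return None
--         if node == goal and len(path) > 1:
--             paths.append(path[:])
--             return None
--         return sorted(graph.get(node, set()))
--
--     frame = enter(start)
--     if frame is not None:
--         stack.append(frame)
--     while stack:
--         top = stack[-1]
--         if not top:
--             stack.pop()
--             visited.discard(path.pop())
--             continue
--         nxt = top.pop(0)
--         if nxt in visited:
--             continue
--         visited.add(nxt)
--         path.append(nxt)
--         child = enter(nxt)
--         if child is not None:
--             stack.append(child)
--         else:
--             visited.discard(path.pop())
--     return paths
-- ===== Notes on version B (the rewrite author's own statement) =====
-- stated objective: alternative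
-- what changed: The recursive backtracking DFS with a shared mutable accumulator is replaced by an iterative DFS driven by an explicit stack of neighbor frames, with path/visited updated and restored as frames are pushed and popped.
import Mathlib
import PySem

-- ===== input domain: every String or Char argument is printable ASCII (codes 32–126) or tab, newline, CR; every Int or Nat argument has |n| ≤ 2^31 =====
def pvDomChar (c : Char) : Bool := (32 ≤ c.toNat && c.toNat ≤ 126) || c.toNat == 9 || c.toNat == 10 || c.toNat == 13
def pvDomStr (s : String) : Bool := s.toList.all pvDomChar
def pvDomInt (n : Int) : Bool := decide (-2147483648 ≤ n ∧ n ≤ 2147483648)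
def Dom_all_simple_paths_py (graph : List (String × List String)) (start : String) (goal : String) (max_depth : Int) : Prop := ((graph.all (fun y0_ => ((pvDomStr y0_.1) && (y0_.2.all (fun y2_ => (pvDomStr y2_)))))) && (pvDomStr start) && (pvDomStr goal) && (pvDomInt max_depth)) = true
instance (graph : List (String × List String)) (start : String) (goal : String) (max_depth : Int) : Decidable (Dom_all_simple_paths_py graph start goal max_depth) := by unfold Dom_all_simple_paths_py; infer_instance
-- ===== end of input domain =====

-- B replaces A's recursive backtracking DFS by an iterative DFS over an explicit
-- stack of neighbor frames (objective: alternative decomposition, same cost).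

-- ===== PORT A =====
-- graph.get(current, set()): first-match association-list lookup (Python dict keys are unique)
def pvGraphGet (graph : List (String × List String)) (node : String) : List String :=
  match graph with
  | [] => []
  | (k, v) :: rest => if k == node then v else pvGraphGet rest node

-- sorted(graph.get(current, set())) — sorting a set's elements, order-independent, exact
def pvSortedNbrs (graph : List (String × List String)) (node : String) : List String :=
  PySem.List.sorted (pvGraphGet graph node) (fun x => x) false

-- the nested `dfs`; persistent visited/path make the Python's pop()/remove() restores no-ops;
-- the fuel only counts recursion depth, which the `len(path) - 1 > max_depth` guard bounds
def pvDfsA (graph : List (String × List String)) (goal : String) (max_depth : Int) :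
    Nat → String → PySem.Set String → List String → List (List String) → List (List String)
  | 0, _, _, _, paths => paths
  | fuel + 1, current, visited, path, paths =>
    if (path.length : Int) - 1 > max_depth then paths
    else if current == goal && decide (1 < path.length) then paths ++ [path]
    else
      (pvSortedNbrs graph current).foldl
        (fun acc nxt =>
          if PySem.Set.contains visited nxt then acc
          else pvDfsA graph goal max_depth fuel nxt (PySem.Set.add visited nxt) (path ++ [nxt]) acc)
        paths

def all_simple_paths_py (graph : List (String × List String)) (start : String) (goal : String) (max_depth : Int) : List (List String) :=
  pvDfsA graph goal max_depth (max_depth.toNat + 2) start (PySem.Set.ofList [start]) [start] []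

-- ===== PORT B =====
-- `enter(node)`: either the path is finished/cut (none) or a frame of neighbors opens
def pvEnter (graph : List (String × List String)) (goal : String) (max_depth : Int)
    (node : String) (path : List String) (paths : List (List String)) :
    Option (List String) × List (List String) :=
  if (path.length : Int) - 1 > max_depth then (none, paths)
  else if node == goal && decide (1 < path.length) then (none, paths ++ [path])
  else (some (pvSortedNbrs graph node), paths)

-- machine state: stack of frames (remaining sorted neighbors), path, visited, collected paths
structure PvCfg where
  stack : List (List String)
  path : List String
  visited : PySem.Set String
  paths : List (List String)
deriving Repr, DecidableEq

-- one iteration of B's while-loop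
def pvStep (graph : List (String × List String)) (goal : String) (max_depth : Int) (c : PvCfg) : PvCfg :=
  match c.stack with
  | [] => c
  | [] :: rest =>
    ⟨rest, c.path.dropLast, PySem.Set.discard c.visited (c.path.getLastD ""), c.paths⟩
  | (nxt :: top) :: rest =>
    if PySem.Set.contains c.visited nxt then ⟨top :: rest, c.path, c.visited, c.paths⟩
    else
      match pvEnter graph goal max_depth nxt (c.path ++ [nxt]) c.paths with
      | (none, paths') =>
        ⟨top :: rest, (c.path ++ [nxt]).dropLast,
         PySem.Set.discard (PySem.Set.add c.visited nxt) ((c.path ++ [nxt]).getLastD ""), paths'⟩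
      | (some child, paths') =>
        ⟨child :: top :: rest, c.path ++ [nxt], PySem.Set.add c.visited nxt, paths'⟩

-- the while-loop; the fuel is a proved upper bound on the iteration count (Python loops unboundedly)
def pvRunB (graph : List (String × List String)) (goal : String) (max_depth : Int)
    (fuel : Nat) (c : PvCfg) : List (List String) :=
  match c.stack with
  | [] => c.paths
  | _ :: _ =>
    match fuel with
    | 0 => c.paths
    | f + 1 => pvRunB graph goal max_depth f (pvStep graph goal max_depth c)

-- fuel bound helpers: all nodes occurring as neighbors, and the largest neighbor-set size
def pvNodes (graph : List (String × List String)) : PySem.Set String :=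
  PySem.Set.ofList (graph.flatMap (·.2))

def pvK : List (String × List String) → Nat
  | [] => 0
  | p :: rest => max p.2.length (pvK rest)

def pvFuel (graph : List (String × List String)) : Nat :=
  (pvK graph + 2) ^ ((pvNodes graph).length + 2) + 1

def all_simple_paths_py_alt (graph : List (String × List String)) (start : String) (goal : String) (max_depth : Int) : List (List String) :=
  match pvEnter graph goal max_depth start [start] [] with
  | (none, paths) => paths
  | (some frame, paths) =>
    pvRunB graph goal max_depth (pvFuel graph) ⟨[frame], [start], PySem.Set.ofList [start], paths⟩

-- ===== PRECONDITION & SPEC =====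
def Spec_all_simple_paths_py (graph : List (String × List String)) (start : String) (goal : String) (max_depth : Int) (out : List (List String)) : Prop := out = all_simple_paths_py_alt graph start goal max_depth
instance (graph : List (String × List String)) (start : String) (goal : String) (max_depth : Int) (out : List (List String)) : Decidable (Spec_all_simple_paths_py graph start goal max_depth out) := by unfold Spec_all_simple_paths_py; infer_instance

-- ===== CLAIM (what is proved, stated in full; the proofs are below) =====
def Claim_equal_all_simple_paths_py : Prop := ∀ (graph : List (String × List String)) (start : String) (goal : String) (max_depth : Int), Dom_all_simple_paths_py graph start goal max_depth → Spec_all_simple_paths_py graph start goal max_depth (all_simple_paths_py graph start goal max_depth)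

-- ===== LEMMAS AND PROOFS =====

-- number of still-unvisited nodes: the exponent of the step-count bound
def pvUnvis (graph : List (String × List String)) (v : PySem.Set String) : Nat :=
  ((pvNodes graph).filter (fun x => !PySem.Set.contains v x)).length

theorem pvDfsA_guardfail (graph : List (String × List String)) (goal : String) (max_depth : Int)
    (f : Nat) (current : String) (visited : PySem.Set String) (path : List String)
    (paths : List (List String)) (h : (path.length : Int) - 1 > max_depth) :
    pvDfsA graph goal max_depth f current visited path paths = paths := by
  cases f <;> simp [pvDfsA, h]

theorem pvContains_add_self (v : PySem.Set String) (x : String) :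
    PySem.Set.contains (PySem.Set.add v x) x = true := by
  rw [PySem.Set.contains_iff, PySem.Set.mem_add]; right; rfl

theorem pvContains_add_ne (v : PySem.Set String) (x y : String) (h : y ≠ x) :
    PySem.Set.contains (PySem.Set.add v x) y = PySem.Set.contains v y := by
  by_cases hy : y ∈ v
  · rw [(PySem.Set.contains_iff _ _).2 hy, (PySem.Set.contains_iff _ _).2 (by rw [PySem.Set.mem_add]; left; exact hy)]
  · have h1 : PySem.Set.contains v y = false := by
      rw [← Bool.not_eq_true, PySem.Set.contains_iff]; exact hy
    have h2 : PySem.Set.contains (PySem.Set.add v x) y = false := by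
      rw [← Bool.not_eq_true, PySem.Set.contains_iff, PySem.Set.mem_add]
      rintro (h' | h') <;> [exact hy h'; exact h h']
    rw [h1, h2]

theorem pvDiscard_add (v : PySem.Set String) (x : String)
    (h : PySem.Set.contains v x = false) :
    PySem.Set.discard (PySem.Set.add v x) x = v := by
  have hx : x ∉ v := by rw [← PySem.Set.contains_iff, h]; exact Bool.false_ne_true
  rw [PySem.Set.add_of_not_mem hx]
  show List.filter _ _ = _
  rw [List.filter_append]
  simp only [List.filter_cons, List.filter_nil]
  have : ∀ y ∈ v, (!(y == x)) = true := by
    intro y hy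
    simp only [Bool.not_eq_eq_eq_not, Bool.not_true, beq_eq_false_iff_ne]
    rintro rfl; exact hx hy
  rw [List.filter_eq_self.2 this]
  simp

theorem pvGraphGet_length_le (graph : List (String × List String)) (node : String) :
    (pvGraphGet graph node).length ≤ pvK graph := by
  induction graph with
  | nil => simp [pvGraphGet, pvK]
  | cons p rest ih =>
    obtain ⟨k, v⟩ := p
    simp only [pvGraphGet, pvK]
    split
    · exact le_max_left _ _
    · exact le_trans ih (le_max_right _ _)

theorem pvSortedNbrs_length_le (graph : List (String × List String)) (node : String) :
    (pvSortedNbrs graph node).length ≤ pvK graph := by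
  rw [pvSortedNbrs, PySem.List.length_sorted]; exact pvGraphGet_length_le graph node

theorem pvSortedNbrs_mem (graph : List (String × List String)) (node : String)
    (x : String) (h : x ∈ pvSortedNbrs graph node) : x ∈ pvNodes graph := by
  rw [pvSortedNbrs, PySem.List.mem_sorted] at h
  rw [pvNodes, PySem.Set.mem_ofList, List.mem_flatMap]
  induction graph with
  | nil => simp [pvGraphGet] at h
  | cons p rest ih =>
    simp only [pvGraphGet] at h
    split at h
    · exact ⟨p, List.mem_cons_self .., h⟩
    · obtain ⟨q, hq, hx⟩ := ih h
      exact ⟨q, List.mem_cons_of_mem _ hq, hx⟩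

theorem pvUnvis_add (graph : List (String × List String)) (v : PySem.Set String)
    (x : String) (hx : x ∈ pvNodes graph) (hv : PySem.Set.contains v x = false) :
    pvUnvis graph (PySem.Set.add v x) + 1 = pvUnvis graph v := by
  have hnd : (pvNodes graph).Nodup := PySem.Set.nodup_ofList _
  unfold pvUnvis
  generalize pvNodes graph = l at hx hnd ⊢
  induction l with
  | nil => simp at hx
  | cons y t ih =>
    rcases List.mem_cons.1 hx with rfl | hxt
    · have hnin : x ∉ t := (List.nodup_cons.1 hnd).1
      have heq : t.filter (fun z => !PySem.Set.contains (PySem.Set.add v x) z)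
          = t.filter (fun z => !PySem.Set.contains v z) := by
        apply List.filter_congr
        intro z hz
        rw [pvContains_add_ne v x z (by rintro rfl; exact hnin hz)]
      have hx1 := pvContains_add_self v x
      rw [List.filter_cons, List.filter_cons, heq, hx1, hv]
      simp
    · have hnin : x ≠ y := by rintro rfl; exact (List.nodup_cons.1 hnd).1 hxt
      have := ih hxt (List.nodup_cons.1 hnd).2
      simp only [List.filter_cons, pvContains_add_ne v x y (Ne.symm hnin)]
      split
      · simpa using this
      · simpa using this

theorem pvUnvis_le (graph : List (String × List String)) (v : PySem.Set String) :
    pvUnvis graph v ≤ (pvNodes graph).length := List.length_filter_le _ _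

-- kernel-evaluation helpers for the machine step and for entering a node
theorem pvStep_cons_frame (graph : List (String × List String)) (goal : String) (max_depth : Int)
    (nxt : String) (top : List String) (rest : List (List String)) (path : List String)
    (visited : PySem.Set String) (paths : List (List String)) :
    pvStep graph goal max_depth ⟨(nxt :: top) :: rest, path, visited, paths⟩ =
      if PySem.Set.contains visited nxt then ⟨top :: rest, path, visited, paths⟩
      else
        match pvEnter graph goal max_depth nxt (path ++ [nxt]) paths with
        | (none, paths') =>
          ⟨top :: rest, (path ++ [nxt]).dropLast,
           PySem.Set.discard (PySem.Set.add visited nxt) ((path ++ [nxt]).getLastD ""), paths'⟩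
        | (some child, paths') =>
          ⟨child :: top :: rest, path ++ [nxt], PySem.Set.add visited nxt, paths'⟩ := rfl

theorem pvEnter_cut (graph : List (String × List String)) (goal : String) (max_depth : Int)
    (node : String) (path : List String) (paths : List (List String))
    (h : (path.length : Int) - 1 > max_depth) :
    pvEnter graph goal max_depth node path paths = (none, paths) := by
  unfold pvEnter; rw [if_pos h]

theorem pvEnter_goal (graph : List (String × List String)) (goal : String) (max_depth : Int)
    (node : String) (path : List String) (paths : List (List String))
    (h1 : ¬((path.length : Int) - 1 > max_depth))
    (h2 : (node == goal && decide (1 < path.length)) = true) :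
    pvEnter graph goal max_depth node path paths = (none, paths ++ [path]) := by
  unfold pvEnter; rw [if_neg h1, if_pos h2]

theorem pvEnter_open (graph : List (String × List String)) (goal : String) (max_depth : Int)
    (node : String) (path : List String) (paths : List (List String))
    (h1 : ¬((path.length : Int) - 1 > max_depth))
    (h2 : ¬((node == goal && decide (1 < path.length)) = true)) :
    pvEnter graph goal max_depth node path paths = (some (pvSortedNbrs graph node), paths) := by
  unfold pvEnter; rw [if_neg h1, if_neg h2]

-- the stack machine simulates the recursive DFS frame by frame
theorem pvSim (graph : List (String × List String)) (goal : String) (max_depth : Int) :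
    ∀ (fa : Nat) (ns : List String) (stack : List (List String)) (path : List String)
      (visited : PySem.Set String) (acc : List (List String)),
      path ≠ [] →
      (∀ x ∈ ns, x ∈ pvNodes graph) →
      max_depth + 2 ≤ (path.length : Int) + fa →
      ∃ k ≤ (ns.length + 1) * (pvK graph + 2) ^ (pvUnvis graph visited + 1),
        (pvStep graph goal max_depth)^[k] ⟨ns :: stack, path, visited, acc⟩ =
          ⟨stack, path.dropLast, PySem.Set.discard visited (path.getLastD ""),
           ns.foldl
             (fun a nxt =>
               if PySem.Set.contains visited nxt then a
               else pvDfsA graph goal max_depth fa nxt (PySem.Set.add visited nxt) (path ++ [nxt]) a)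
             acc⟩ := by
  intro fa
  induction fa using Nat.strong_induction_on with
  | _ fa IHfa =>
    intro ns
    induction ns with
    | nil =>
      intro stack path visited acc hp hsub hdep
      refine ⟨1, ?_, ?_⟩
      · have h1 : 1 ≤ (pvK graph + 2) ^ (pvUnvis graph visited + 1) := Nat.one_le_pow _ _ (by omega)
        simpa using h1
      · simp only [Function.iterate_one, List.foldl_nil]
        rfl
    | cons nxt rest IHns =>
      intro stack path visited acc hp hsub hdep
      have hnxt_node : nxt ∈ pvNodes graph := hsub nxt (List.mem_cons_self ..)
      have hsub' : ∀ x ∈ rest, x ∈ pvNodes graph := fun x hx => hsub x (List.mem_cons_of_mem _ hx)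
      have hE1 : 1 ≤ (pvK graph + 2) ^ (pvUnvis graph visited + 1) := Nat.one_le_pow _ _ (by omega)
      by_cases hvis : PySem.Set.contains visited nxt = true
      · -- skipped neighbor
        have hstep : pvStep graph goal max_depth ⟨(nxt :: rest) :: stack, path, visited, acc⟩
            = ⟨rest :: stack, path, visited, acc⟩ := by
          rw [pvStep_cons_frame, if_pos hvis]
        obtain ⟨k, hk, hit⟩ := IHns stack path visited acc hp hsub' hdep
        refine ⟨k + 1, ?_, ?_⟩
        · have : (rest.length + 1 + 1) * (pvK graph + 2) ^ (pvUnvis graph visited + 1)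
              = (rest.length + 1) * (pvK graph + 2) ^ (pvUnvis graph visited + 1)
                + (pvK graph + 2) ^ (pvUnvis graph visited + 1) := by ring
          simp only [List.length_cons, this]
          omega
        · rw [Function.iterate_succ_apply, hstep, List.foldl_cons, if_pos hvis]
          exact hit
      · have hvisF : PySem.Set.contains visited nxt = false := by
          simpa using hvis
        by_cases hguard : ((path ++ [nxt]).length : Int) - 1 > max_depth
        · -- depth cut: entered node is dropped again at once
          have hstep : pvStep graph goal max_depth ⟨(nxt :: rest) :: stack, path, visited, acc⟩
              = ⟨rest :: stack, path, visited, acc⟩ := by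
            rw [pvStep_cons_frame, if_neg hvis, pvEnter_cut graph goal max_depth nxt _ _ hguard]
            simp only [List.dropLast_concat, List.getLastD_concat, pvDiscard_add _ _ hvisF]
          obtain ⟨k, hk, hit⟩ := IHns stack path visited acc hp hsub' hdep
          refine ⟨k + 1, ?_, ?_⟩
          · have : (rest.length + 1 + 1) * (pvK graph + 2) ^ (pvUnvis graph visited + 1)
                = (rest.length + 1) * (pvK graph + 2) ^ (pvUnvis graph visited + 1)
                  + (pvK graph + 2) ^ (pvUnvis graph visited + 1) := by ring
            simp only [List.length_cons, this]
            omega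
          · rw [Function.iterate_succ_apply, hstep, List.foldl_cons, if_neg hvis,
              pvDfsA_guardfail graph goal max_depth fa nxt _ _ _ hguard]
            exact hit
        · have hl : ((path ++ [nxt]).length : Int) = (path.length : Int) + 1 := by
            rw [List.length_append, List.length_cons, List.length_nil]
            push_cast
            ring
          have hfa2 : 2 ≤ fa := by
            rw [hl] at hguard
            omega
          obtain ⟨m, rfl⟩ : ∃ m, fa = m + 1 := ⟨fa - 1, by omega⟩
          by_cases hgoal : (nxt == goal && decide (1 < (path ++ [nxt]).length)) = true
          · -- goal reached: record the path, drop the node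
            have hstep : pvStep graph goal max_depth ⟨(nxt :: rest) :: stack, path, visited, acc⟩
                = ⟨rest :: stack, path, visited, acc ++ [path ++ [nxt]]⟩ := by
              rw [pvStep_cons_frame, if_neg hvis,
                pvEnter_goal graph goal max_depth nxt _ _ hguard hgoal]
              simp only [List.dropLast_concat, List.getLastD_concat, pvDiscard_add _ _ hvisF]
            obtain ⟨k, hk, hit⟩ := IHns stack path visited (acc ++ [path ++ [nxt]]) hp hsub' hdep
            refine ⟨k + 1, ?_, ?_⟩
            · have : (rest.length + 1 + 1) * (pvK graph + 2) ^ (pvUnvis graph visited + 1)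
                  = (rest.length + 1) * (pvK graph + 2) ^ (pvUnvis graph visited + 1)
                    + (pvK graph + 2) ^ (pvUnvis graph visited + 1) := by ring
              simp only [List.length_cons, this]
              omega
            · rw [Function.iterate_succ_apply, hstep, List.foldl_cons, if_neg hvis]
              have hd : pvDfsA graph goal max_depth (m + 1) nxt (PySem.Set.add visited nxt)
                  (path ++ [nxt]) acc = acc ++ [path ++ [nxt]] := by
                simp only [pvDfsA, if_neg hguard, if_pos hgoal]
              rw [hd]
              exact hit
          · -- expand: a child frame is pushed and fully processed, then the rest
            have hstep : pvStep graph goal max_depth ⟨(nxt :: rest) :: stack, path, visited, acc⟩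
                = ⟨pvSortedNbrs graph nxt :: rest :: stack, path ++ [nxt],
                   PySem.Set.add visited nxt, acc⟩ := by
              rw [pvStep_cons_frame, if_neg hvis,
                pvEnter_open graph goal max_depth nxt _ _ hguard hgoal]
            have hdep' : max_depth + 2 ≤ ((path ++ [nxt]).length : Int) + m := by
              rw [hl]
              omega
            obtain ⟨kc, hkc, hitc⟩ := IHfa m (by omega) (pvSortedNbrs graph nxt)
              (rest :: stack) (path ++ [nxt]) (PySem.Set.add visited nxt) acc
              (by simp) (fun x hx => pvSortedNbrs_mem graph nxt x hx) hdep'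
            rw [List.dropLast_concat, List.getLastD_concat, pvDiscard_add _ _ hvisF] at hitc
            set X := (pvSortedNbrs graph nxt).foldl
              (fun a y =>
                if PySem.Set.contains (PySem.Set.add visited nxt) y then a
                else pvDfsA graph goal max_depth m y
                  (PySem.Set.add (PySem.Set.add visited nxt) y) ((path ++ [nxt]) ++ [y]) a)
              acc with hXdef
            obtain ⟨kr, hkr, hitr⟩ := IHns stack path visited X hp hsub' hdep
            refine ⟨kr + (kc + 1), ?_, ?_⟩
            · -- arithmetic for the step-count bound
              have hu : pvUnvis graph (PySem.Set.add visited nxt) + 1 = pvUnvis graph visited :=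
                pvUnvis_add graph visited nxt hnxt_node hvisF
              have hcl : (pvSortedNbrs graph nxt).length ≤ pvK graph :=
                pvSortedNbrs_length_le graph nxt
              have h1 : 1 ≤ (pvK graph + 2) ^ pvUnvis graph (PySem.Set.add visited nxt) :=
                Nat.one_le_pow _ _ (by omega)
              have hkc' : kc + 1 ≤ (pvK graph + 2) ^ (pvUnvis graph visited + 1) := by
                calc kc + 1 ≤ ((pvSortedNbrs graph nxt).length + 1)
                      * (pvK graph + 2) ^ (pvUnvis graph (PySem.Set.add visited nxt) + 1) + 1 := by omega
                  _ ≤ (pvK graph + 1) * (pvK graph + 2) ^ (pvUnvis graph (PySem.Set.add visited nxt) + 1)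
                      + (pvK graph + 2) ^ pvUnvis graph (PySem.Set.add visited nxt) := by
                        have := Nat.mul_le_mul_right
                          ((pvK graph + 2) ^ (pvUnvis graph (PySem.Set.add visited nxt) + 1))
                          (show (pvSortedNbrs graph nxt).length + 1 ≤ pvK graph + 1 by omega)
                        omega
                  _ ≤ (pvK graph + 2) ^ (pvUnvis graph visited + 1) := by
                        rw [← hu, pow_succ, pow_succ]
                        have t1 : (pvK graph + 1) * (pvK graph + 2) + 1
                            ≤ (pvK graph + 2) * (pvK graph + 2) := by nlinarith
                        calc (pvK graph + 1) * ((pvK graph + 2) ^ pvUnvis graph (PySem.Set.add visited nxt) * (pvK graph + 2))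
                              + (pvK graph + 2) ^ pvUnvis graph (PySem.Set.add visited nxt)
                            = (pvK graph + 2) ^ pvUnvis graph (PySem.Set.add visited nxt)
                              * ((pvK graph + 1) * (pvK graph + 2) + 1) := by ring
                          _ ≤ (pvK graph + 2) ^ pvUnvis graph (PySem.Set.add visited nxt)
                              * ((pvK graph + 2) * (pvK graph + 2)) := Nat.mul_le_mul_left _ t1
                          _ = (pvK graph + 2) ^ pvUnvis graph (PySem.Set.add visited nxt)
                              * (pvK graph + 2) * (pvK graph + 2) := by ring
              have : (rest.length + 1 + 1) * (pvK graph + 2) ^ (pvUnvis graph visited + 1)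
                  = (rest.length + 1) * (pvK graph + 2) ^ (pvUnvis graph visited + 1)
                    + (pvK graph + 2) ^ (pvUnvis graph visited + 1) := by ring
              simp only [List.length_cons, this]
              omega
            · rw [Function.iterate_add_apply, Function.iterate_succ_apply, hstep, hitc,
                List.foldl_cons, if_neg hvis]
              have hd : pvDfsA graph goal max_depth (m + 1) nxt (PySem.Set.add visited nxt)
                  (path ++ [nxt]) acc = X := by
                simp only [pvDfsA, if_neg hguard, if_neg hgoal, hXdef]
              rw [hd]
              exact hitr

-- once the machine halts, any sufficient fuel returns the collected paths
theorem pvRunB_halt (graph : List (String × List String)) (goal : String) (max_depth : Int) :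
    ∀ (k f : Nat) (c : PvCfg),
      ((pvStep graph goal max_depth)^[k] c).stack = [] → k ≤ f →
      pvRunB graph goal max_depth f c = ((pvStep graph goal max_depth)^[k] c).paths := by
  intro k
  induction k with
  | zero =>
    intro f c h _
    simp only [Function.iterate_zero, id_eq] at h ⊢
    obtain ⟨s, p, v, a⟩ := c
    subst h; rw [pvRunB.eq_def]
  | succ k ih =>
    intro f c h hf
    obtain ⟨s, p, v, a⟩ := c
    match s, f with
    | [], f =>
      have hfix : pvStep graph goal max_depth ⟨[], p, v, a⟩ = ⟨[], p, v, a⟩ := by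
        simp [pvStep]
      rw [Function.iterate_fixed hfix]
      rw [pvRunB.eq_def]
    | x :: s', 0 => omega
    | x :: s', f + 1 =>
      have hstep : pvRunB graph goal max_depth (f + 1) ⟨x :: s', p, v, a⟩
          = pvRunB graph goal max_depth f (pvStep graph goal max_depth ⟨x :: s', p, v, a⟩) := by rw [pvRunB.eq_def]
      rw [hstep]
      rw [Function.iterate_succ_apply] at h ⊢
      exact ih f _ h (by omega)

-- ===== VERDICT (by name: the statement is the Claim_ definition above) =====
theorem all_simple_paths_py_spec : Claim_equal_all_simple_paths_py := by
  intro graph start goal max_depth _dom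
  show all_simple_paths_py graph start goal max_depth = all_simple_paths_py_alt graph start goal max_depth
  unfold all_simple_paths_py all_simple_paths_py_alt
  by_cases h0 : (([start] : List String).length : Int) - 1 > max_depth
  · -- max_depth < 0: the root itself is cut
    rw [pvEnter_cut graph goal max_depth start _ _ h0,
      pvDfsA_guardfail graph goal max_depth _ start _ _ _ h0]
  · have hgoal : ¬((start == goal && decide (1 < ([start] : List String).length)) = true) := by
      simp
    rw [pvEnter_open graph goal max_depth start _ _ h0 hgoal]
    have hmd : (0 : Int) ≤ max_depth := by
      simp only [List.length_cons, List.length_nil] at h0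
      omega
    have hA : pvDfsA graph goal max_depth (max_depth.toNat + 2) start (PySem.Set.ofList [start])
        [start] []
        = (pvSortedNbrs graph start).foldl
            (fun a nxt =>
              if PySem.Set.contains (PySem.Set.ofList [start]) nxt then a
              else pvDfsA graph goal max_depth (max_depth.toNat + 1) nxt
                (PySem.Set.add (PySem.Set.ofList [start]) nxt) ([start] ++ [nxt]) a)
            [] := by
      simp only [pvDfsA, if_neg h0, if_neg hgoal]
    obtain ⟨k, hk, hit⟩ := pvSim graph goal max_depth (max_depth.toNat + 1)
      (pvSortedNbrs graph start) [] [start] (PySem.Set.ofList [start]) []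
      (by simp) (fun x hx => pvSortedNbrs_mem graph start x hx)
      (by
        simp only [List.length_cons, List.length_nil]
        push_cast [Int.toNat_of_nonneg hmd]
        omega)
    have hkfuel : k ≤ pvFuel graph := by
      have h1 : (pvSortedNbrs graph start).length ≤ pvK graph := pvSortedNbrs_length_le graph start
      have h2 : pvUnvis graph (PySem.Set.ofList [start]) ≤ (pvNodes graph).length :=
        pvUnvis_le graph (PySem.Set.ofList [start])
      have h3 : (pvK graph + 2) ^ (pvUnvis graph (PySem.Set.ofList [start]) + 1)
          ≤ (pvK graph + 2) ^ ((pvNodes graph).length + 1) :=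
        Nat.pow_le_pow_right (by omega) (by omega)
      have h4 : ((pvSortedNbrs graph start).length + 1)
            * (pvK graph + 2) ^ (pvUnvis graph (PySem.Set.ofList [start]) + 1)
          ≤ (pvK graph + 1) * (pvK graph + 2) ^ ((pvNodes graph).length + 1) :=
        Nat.mul_le_mul (by omega) h3
      have h5 : (pvK graph + 1) * (pvK graph + 2) ^ ((pvNodes graph).length + 1)
          ≤ (pvK graph + 2) ^ ((pvNodes graph).length + 2) := by
        rw [pow_succ]
        calc (pvK graph + 1) * (pvK graph + 2) ^ ((pvNodes graph).length + 1)
            ≤ (pvK graph + 2) * (pvK graph + 2) ^ ((pvNodes graph).length + 1) :=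
              Nat.mul_le_mul_right _ (by omega)
          _ = (pvK graph + 2) ^ ((pvNodes graph).length + 1) * (pvK graph + 2) :=
              Nat.mul_comm _ _
      unfold pvFuel
      exact hk.trans (h4.trans (h5.trans (Nat.le_add_right _ 1)))
    have hrun := pvRunB_halt graph goal max_depth k (pvFuel graph)
      ⟨[pvSortedNbrs graph start], [start], PySem.Set.ofList [start], []⟩
      (by rw [hit]) hkfuel
    exact hA.trans ((hrun.trans (congrArg PvCfg.paths hit)).symm)
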